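-- pv_equiv track=rewrite | github.com/bhuynh702/python_projects | Homeworks/hw6/starfish.py | starfish
-- ===== SOURCE A (Python) =====
-- def starfish(leg_list, generations):
--     # the param leg_list is the list that hold the inputted values
--     # the base case: generations = 0 ends the function and returns the leg_list
--     if generations == 0:
--         return leg_list
--     else:
--         # this is a new list which holds the new values appended in the while loop
--         new_legs = []
--         # this while loops detects 5's in the given list
--         while 5 in leg_list:
--             leg_list.remove(5)  # removes them
--             for z in range(5):
--                 new_legs.append(1)  # and appends 1, 5 times
--         for i in range(len(leg_list)):
--             leg_list[i] += 1  # then adds 1 to each value in the list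
--     # in the end it combines leg_list and the new_legs list and \
--     # generations - 1: which is what allows the function to traverse/iterate (generation) amount of times
--     # til it hits 0 and ends function
--     return starfish(leg_list + new_legs, generations - 1)
-- ===== SOURCE B (Python) =====
-- def starfish(leg_list, generations):
--     legs = leg_list
--     for _ in range(generations):
--         fives = legs.count(5)
--         legs = [x + 1 for x in legs if x != 5] + [1] * (5 * fives)
--     return legs
-- ===== Notes on version B (the rewrite author's own statement) =====
-- stated objective: alternative
-- what changed: Replaces the recursion with a loop over generations, and replaces the repeated 'while 5 in list: remove(5)' rescans with a single count-and-filter pass per generation (the list itself can grow exponentially with generations, so wall-clock at large sizes is dominated by output size for both).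
-- outside the precondition, e.g. on starfish([], 950): A returns [], B returns []
import Mathlib
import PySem

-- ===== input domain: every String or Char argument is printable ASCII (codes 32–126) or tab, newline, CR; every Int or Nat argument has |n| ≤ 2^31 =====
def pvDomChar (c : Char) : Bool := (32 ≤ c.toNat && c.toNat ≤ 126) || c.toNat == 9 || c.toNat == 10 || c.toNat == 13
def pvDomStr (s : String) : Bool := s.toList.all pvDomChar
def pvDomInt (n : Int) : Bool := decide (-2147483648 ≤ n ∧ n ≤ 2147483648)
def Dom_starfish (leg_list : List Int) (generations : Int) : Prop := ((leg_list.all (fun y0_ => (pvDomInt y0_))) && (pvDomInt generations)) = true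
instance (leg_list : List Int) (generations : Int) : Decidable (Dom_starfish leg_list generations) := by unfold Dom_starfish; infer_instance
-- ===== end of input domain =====

-- B replaces A's recursion + repeated 'while 5 in list: remove(5)' scans by one
-- count-and-filter pass per generation inside a loop (A also mutates leg_list in
-- place; the equivalence proved here is about the return value only).


-- ===== PORT A =====
-- 'while 5 in leg_list: leg_list.remove(5); new_legs += [1]*5' — remove(5) on a
-- list containing 5 removes the first occurrence, i.e. List.erase.
def starfishWhile (legs newLegs : List Int) : List Int × List Int :=
  if h : (5 : Int) ∈ legs then
    starfishWhile (legs.erase 5) (newLegs ++ [1, 1, 1, 1, 1])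
  else
    (legs, newLegs)
termination_by legs.length
decreasing_by
  have h1 := List.length_erase_of_mem h
  have h2 := List.length_pos_of_mem h
  omega

-- recursion on 'generations' as fuel (Python A recurses until generations hits 0;
-- for negative generations A never returns — excluded by Pre_ below)
def starfishGo (legs : List Int) : Nat → List Int
  | 0 => legs
  | n + 1 =>
    let p := starfishWhile legs []
    -- 'for i in range(len(leg_list)): leg_list[i] += 1' increments every element in place
    starfishGo (p.1.map (· + 1) ++ p.2) n

def starfish (leg_list : List Int) (generations : Int) : List Int :=
  starfishGo leg_list generations.toNat

-- ===== PORT B =====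
def starfish_alt (leg_list : List Int) (generations : Int) : List Int :=
  (List.range generations.toNat).foldl
    (fun legs _ =>
      let fives := legs.count 5
      (legs.filter (fun x => x != 5)).map (· + 1) ++ List.replicate (5 * fives) 1)
    leg_list

-- ===== PRECONDITION & SPEC =====
-- Pre_ excludes generations outside [0, 900): A recurses once per generation, so a
-- negative count recurses without bound and a large one overflows CPython's default
-- recursion limit (RecursionError); the exact overflow point depends on the caller's
-- stack depth, so a safely smaller bound is used (it may exclude a few inputs near
-- the limit on which A still returns, e.g. ([], 950)).
def Pre_starfish (leg_list : List Int) (generations : Int) : Prop := 0 ≤ generations ∧ generations < 900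
instance (leg_list : List Int) (generations : Int) : Decidable (Pre_starfish leg_list generations) := by unfold Pre_starfish; infer_instance
def pvWitness_starfish : List Int × Int := ([5, 2, 7], 3)
def Spec_starfish (leg_list : List Int) (generations : Int) (out : List Int) : Prop := out = starfish_alt leg_list generations
instance (leg_list : List Int) (generations : Int) (out : List Int) : Decidable (Spec_starfish leg_list generations out) := by unfold Spec_starfish; infer_instance

-- ===== CLAIM (what is proved, stated in full; the proofs are below) =====
def Claim_equal_starfish : Prop := ∀ (leg_list : List Int) (generations : Int), Dom_starfish leg_list generations → Pre_starfish leg_list generations → Spec_starfish leg_list generations (starfish leg_list generations)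

-- ===== LEMMAS AND PROOFS =====

lemma filter_erase_five (l : List Int) :
    ((l.erase 5).filter (fun x => x != 5)) = l.filter (fun x => x != 5) := by
  induction l with
  | nil => rfl
  | cons a t ih =>
    by_cases h : a = (5 : Int)
    · subst h; simp
    · simp [h, ih, bne_iff_ne]

-- A's while loop yields (all 5s removed, acc ++ five 1s per removed 5)
lemma starfishWhile_eq (legs acc : List Int) :
    starfishWhile legs acc =
      (legs.filter (fun x => x != 5), acc ++ List.replicate (5 * legs.count 5) 1) := by
  induction legs, acc using starfishWhile.induct with
  | case1 legs acc h ih =>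
    rw [starfishWhile, dif_pos h, ih, filter_erase_five]
    have hc : 1 ≤ legs.count 5 := List.one_le_count_iff.mpr h
    have : (5 : Nat) * (legs.erase 5).count 5 + 5 = 5 * legs.count 5 := by
      rw [List.count_erase_self]; omega
    rw [List.append_assoc]
    congr 2
    rw [show ([1, 1, 1, 1, 1] : List Int) = List.replicate 5 1 from rfl, ← List.replicate_add]
    congr 1
    omega
  | case2 legs acc h =>
    rw [starfishWhile, dif_neg h]
    have h0 : legs.count 5 = 0 := List.count_eq_zero.mpr h
    have hf : legs.filter (fun x => x != 5) = legs :=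
      List.filter_eq_self.mpr (fun a ha => by simp [bne_iff_ne]; rintro rfl; exact h ha)
    simp [h0, hf]

lemma starfish_step {α : Type} (f : α → α) (n : Nat) (x : α) :
    (List.range (n + 1)).foldl (fun y _ => f y) x =
      (List.range n).foldl (fun y _ => f y) (f x) := by
  rw [List.range_succ_eq_map]
  simp [List.foldl_map]

lemma starfishGo_eq_alt (n : Nat) (legs : List Int) :
    starfishGo legs n =
      (List.range n).foldl
        (fun ls _ => (ls.filter (fun x => x != 5)).map (· + 1) ++ List.replicate (5 * ls.count 5) 1)
        legs := by
  induction n generalizing legs with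
  | zero => rfl
  | succ n ih =>
    rw [starfishGo, starfish_step, ih, starfishWhile_eq]
    simp

-- ===== VERDICT (by name: the statement is the Claim_ definition above) =====
theorem starfish_spec : Claim_equal_starfish := by
  intro leg_list generations _ _
  unfold Spec_starfish starfish starfish_alt
  exact starfishGo_eq_alt _ _
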